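-- pv_equiv track=rewrite | github.com/PetterPet01/NVIDIATrack3-MR | VADAR/demo-notebook/full_pipeline_refactored.py | normalize_indentation_simple
-- ===== SOURCE A (Python) =====
-- def normalize_indentation_simple(code: str, target_base_indent: int = 4) -> str:
--     """
--     Simple but robust indentation normalization.
--     Uses a heuristic approach that's more forgiving.
--     """
--     if not code.strip():
--         return ' ' * target_base_indent + 'pass'
--
--     # Convert tabs to spaces and split into lines
--     lines = code.replace('\t', '    ').splitlines()
--
--     # Remove completely empty lines at start and end
--     while lines and not lines[0].strip():
--         lines.pop(0)
--     while lines and not lines[-1].strip():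
--         lines.pop()
--
--     if not lines:
--         return ' ' * target_base_indent + 'pass'
--
--     # Find the minimum indentation (ignoring empty lines)
--     min_indent = float('inf')
--     for line in lines:
--         if line.strip():  # Only consider non-empty lines
--             indent = len(line) - len(line.lstrip())
--             min_indent = min(min_indent, indent)
--
--     if min_indent == float('inf'):
--         min_indent = 0
--
--     # Remove the common indentation and add target base indent
--     result_lines = []
--     for line in lines:
--         if line.strip():
--             # Remove common indent and add target indent
--             relative_indent = len(line) - len(line.lstrip()) - min_indent
--             new_line = ' ' * (target_base_indent + relative_indent) + line.lstrip()
--             result_lines.append(new_line)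
--         else:
--             result_lines.append('')  # Keep empty lines as-is
--
--     return '\n'.join(result_lines)
-- ===== SOURCE B (Python) =====
-- def normalize_indentation_simple(code: str, target_base_indent: int = 4) -> str:
--     # textwrap-style pipeline: compute the common whitespace *margin string* by
--     # prefix-shrinking (dedent's algorithm), then re-prefix non-blank lines and
--     # trim boundary blank lines by stripping newlines from the joined text.
--     lines = code.replace('\t', '    ').splitlines()
--     margin = None
--     for line in lines:
--         stripped = line.lstrip()
--         if stripped:
--             indent = line[:len(line) - len(stripped)]
--             if margin is None:
--                 margin = indent
--             else:
--                 while not indent.startswith(margin):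
--                     margin = margin[:-1]
--     if margin is None:
--         return ' ' * target_base_indent + 'pass'
--     pad = ' ' * target_base_indent
--     out = '\n'.join(pad + line[len(margin):] if line.strip() else ''
--                     for line in lines)
--     return out.strip('\n')
-- ===== Notes on version B (the rewrite author's own statement) =====
-- stated objective: alternative
-- what changed: B is a textwrap-style dedent/indent pipeline: instead of A's integer minimum-indent loop and per-line rebuild of space*(target+indent-min) plus the stripped text, B computes a common whitespace margin STRING by prefix-shrinking (startswith / while margin=margin[:-1], textwrap.dedent's algorithm), slices each line past the margin and prefixes a fixed pad, and trims boundary blank lines by stripping newlines from the joined text rather than A's two while-pop loops; …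
-- outside the precondition, e.g. on normalize_indentation_simple('a\n   b', -2): A returns 'a\n b', B returns 'a\n   b'
import Mathlib
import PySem

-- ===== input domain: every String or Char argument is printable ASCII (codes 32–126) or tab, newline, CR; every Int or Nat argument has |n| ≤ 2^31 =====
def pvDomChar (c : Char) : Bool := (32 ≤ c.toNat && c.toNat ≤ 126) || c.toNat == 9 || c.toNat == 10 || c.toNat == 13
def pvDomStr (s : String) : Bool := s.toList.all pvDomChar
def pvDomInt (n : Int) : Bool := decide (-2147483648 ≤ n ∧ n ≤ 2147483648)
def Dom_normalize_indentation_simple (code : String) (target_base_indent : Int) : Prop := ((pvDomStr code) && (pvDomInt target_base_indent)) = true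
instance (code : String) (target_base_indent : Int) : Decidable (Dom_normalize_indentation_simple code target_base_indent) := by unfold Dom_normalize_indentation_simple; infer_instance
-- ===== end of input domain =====

-- B replaces A's integer minimum-indent computation by a textwrap-style dedent/indent
-- pipeline (a common whitespace margin STRING found by prefix-shrinking, then each line
-- sliced past it and re-prefixed), trimming boundary blank lines by stripping newlines
-- from the joined text (objective: alternative; same O(n) cost).

-- ===== PORT A =====
-- line.strip() == '' — A's blank-line test
def pvA_blank (l : List Char) : Bool := PySem.Chars.strip l == []
-- len(line) - len(line.lstrip())
def pvA_indent (l : List Char) : Int := (l.length : Int) - ((PySem.Chars.lstrip l).length : Int)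
-- while lines and not lines[0].strip(): lines.pop(0)
def pvA_popLeading : List (List Char) → List (List Char)
  | [] => []
  | l :: ls => if pvA_blank l then pvA_popLeading ls else l :: ls
-- while lines and not lines[-1].strip(): lines.pop()   (pop from the end while blank)
def pvA_popTrailing (ls : List (List Char)) : List (List Char) :=
  ls.foldr (fun l r => if r.isEmpty && pvA_blank l then [] else l :: r) []

def normalize_indentation_simple (code : String) (target_base_indent : Int) : String :=
  if PySem.Str.strip code == "" then
    String.ofList (PySem.List.pyRepeat [' '] target_base_indent ++ ['p','a','s','s'])
  else
    let lines0 := PySem.Chars.splitlines (PySem.Chars.replace code.toList ['\t'] [' ',' ',' ',' '])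
    let lines := pvA_popTrailing (pvA_popLeading lines0)
    if lines.isEmpty then
      String.ofList (PySem.List.pyRepeat [' '] target_base_indent ++ ['p','a','s','s'])
    else
      -- the min_indent loop; Option Int models float('inf') exactly (none = inf)
      let minOpt := lines.foldl (fun m l =>
        if !(pvA_blank l) then
          some (match m with
                | none => pvA_indent l
                | some v => min v (pvA_indent l))
        else m) (none : Option Int)
      let minInd := minOpt.getD 0   -- 'if min_indent == float(inf): min_indent = 0'
      let res := lines.foldl (fun acc l =>
        if !(pvA_blank l) then
          acc ++ [PySem.List.pyRepeat [' '] (target_base_indent + (pvA_indent l - minInd)) ++ PySem.Chars.lstrip l]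
        else acc ++ [([] : List Char)]) []
      String.ofList (PySem.Chars.join ['\n'] res)

-- ===== PORT B =====
-- 'while not indent.startswith(margin): margin = margin[:-1]' (margin[:-1] is the slice [:-1])
def pvShrink (margin indent : List Char) : List Char :=
  if PySem.Chars.startswith indent margin then margin
  else pvShrink (PySem.Chars.slice margin none (some (-1))) indent
termination_by margin.length
decreasing_by
  rename_i h
  rw [PySem.Chars.slice_eq_listSlice, PySem.List.slice_to_neg_one]
  cases margin with
  | nil => exact absurd (by simp [PySem.Chars.startswith]) h
  | cons c t => simp [List.length_dropLast]

-- the body of B's 'for line in lines:' margin loop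
def pvB_marginStep (mo : Option (List Char)) (l : List Char) : Option (List Char) :=
  let stripped := PySem.Chars.lstrip l
  if stripped ≠ [] then
    -- indent = line[:len(line) - len(stripped)]
    let ind := PySem.Chars.slice l none (some ((l.length : Int) - ((stripped.length : Nat) : Int)))
    some (match mo with
          | none => ind
          | some m => pvShrink m ind)
  else mo

def normalize_indentation_simple_alt (code : String) (target_base_indent : Int) : String :=
  let lines := PySem.Chars.splitlines (PySem.Chars.replace code.toList ['\t'] [' ',' ',' ',' '])
  match lines.foldl pvB_marginStep none with
  | none => String.ofList (PySem.List.pyRepeat [' '] target_base_indent ++ ['p','a','s','s'])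
  | some margin =>
    let pad := PySem.List.pyRepeat [' '] target_base_indent
    let out := PySem.Chars.join ['\n'] (lines.map (fun l =>
      if PySem.Chars.strip l ≠ [] then pad ++ PySem.Chars.slice l (some ((margin.length : Nat) : Int)) none
      else []))
    String.ofList (PySem.Chars.stripChars out ['\n'])

-- ===== PRECONDITION & SPEC =====
-- Pre_ excludes negative target_base_indent (outside the natural domain of an indent
-- width): there A's clamping of a space string repeated a negative number of times can
-- eat a line's relative indentation, which B's dedent-then-pad pipeline preserves.
def Pre_normalize_indentation_simple (code : String) (target_base_indent : Int) : Prop :=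
  0 ≤ target_base_indent
instance (code : String) (target_base_indent : Int) : Decidable (Pre_normalize_indentation_simple code target_base_indent) := by unfold Pre_normalize_indentation_simple; infer_instance
def pvWitness_normalize_indentation_simple : String × Int := ("  x\n    y", 4)

def Spec_normalize_indentation_simple (code : String) (target_base_indent : Int) (out : String) : Prop := out = normalize_indentation_simple_alt code target_base_indent
instance (code : String) (target_base_indent : Int) (out : String) : Decidable (Spec_normalize_indentation_simple code target_base_indent out) := by unfold Spec_normalize_indentation_simple; infer_instance

-- ===== CLAIM (what is proved, stated in full; the proofs are below) =====
def Claim_equal_normalize_indentation_simple : Prop := ∀ (code : String) (target_base_indent : Int), Dom_normalize_indentation_simple code target_base_indent → Pre_normalize_indentation_simple code target_base_indent → Spec_normalize_indentation_simple code target_base_indent (normalize_indentation_simple code target_base_indent)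

-- ===== LEMMAS AND PROOFS =====

-- the break-character test splitlines uses, as a named function
def pvIsB (c : Char) : Bool :=
  decide (c.toNat = 10) || decide (c.toNat = 13) || decide (c.toNat = 11) || decide (c.toNat = 12) ||
  decide (c.toNat = 28) || decide (c.toNat = 29) || decide (c.toNat = 30) || decide (c.toNat = 133) ||
  decide (c.toNat = 8232) || decide (c.toNat = 8233)

-- a character of a line of code admitted by Dom: printable ASCII
def pvGood (c : Char) : Bool := decide (32 ≤ c.toNat) && decide (c.toNat ≤ 126)

-- B's per-line optional indent, as A measures it
def pvH (l : List Char) : Option Int :=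
  if PySem.Chars.lstrip l ≠ [] then some (pvA_indent l) else none

-- A's running-min step on Option Int
def pvOM (m : Option Int) (v : Int) : Option Int :=
  some (match m with | none => v | some w => min w v)

-- margins as strings: the replicate image of an integer indent
def pvRep (v : Int) : List Char := List.replicate v.toNat ' '

lemma pvOM_none (v : Int) : pvOM none v = some v := rfl
lemma pvOM_some (w v : Int) : pvOM (some w) v = some (min w v) := rfl

lemma pv_splitlines_eq (cs : List Char) :
    PySem.Chars.splitlines cs = PySem.Chars.splitlines.go pvIsB cs [] [] := rfl

lemma pv_isB_isspace (c : Char) (h : pvIsB c = true) : PySem.Chars.isspace c = true := by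
  simp only [pvIsB, Bool.or_eq_true, decide_eq_true_eq] at h
  simp only [PySem.Chars.isspace, Bool.or_eq_true, Bool.and_eq_true, decide_eq_true_eq]
  omega

lemma pv_go_mem : ∀ (n : Nat) (cs : List Char), cs.length ≤ n → ∀ (cur : List Char) (acc : List (List Char)) (c : Char),
    (c ∈ (PySem.Chars.splitlines.go pvIsB cs cur acc).flatten) ↔
      (c ∈ acc.flatten ∨ c ∈ cur ∨ (c ∈ cs ∧ pvIsB c = false)) := by
  intro n
  induction n with
  | zero =>
    intro cs hlen cur acc c
    have hcs : cs = [] := List.length_eq_zero_iff.mp (Nat.le_zero.mp hlen)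
    subst hcs
    have hnil : PySem.Chars.splitlines.go pvIsB [] cur acc =
        if cur.isEmpty = true then acc.reverse else (cur.reverse :: acc).reverse := rfl
    rw [hnil]
    by_cases hcur : cur.isEmpty = true
    · rw [if_pos hcur]
      simp [List.mem_flatten, List.isEmpty_iff.mp hcur]
    · rw [if_neg hcur]
      simp [List.mem_flatten]
  | succ n ih =>
    intro cs hlen cur acc c
    rw [PySem.Chars.splitlines.go.eq_def]
    split
    · -- cs = []
      by_cases hcur : cur.isEmpty = true
      · rw [if_pos hcur]
        simp [List.mem_flatten, List.isEmpty_iff.mp hcur]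
      · rw [if_neg hcur]
        simp [List.mem_flatten]
    · -- cs = '\r' :: '\n' :: rest
      rename_i rest
      rw [ih rest (by simp at hlen; omega)]
      have h13 : pvIsB '\x0d' = true := by decide
      have h10 : pvIsB '\n' = true := by decide
      simp only [List.flatten_cons, List.mem_append, List.mem_reverse, List.mem_cons,
        List.not_mem_nil, false_or]
      constructor
      · rintro (h | h | ⟨h1, h2⟩) <;> tauto
      · rintro (h | h | ⟨(rfl | rfl | h1), h2⟩) <;> tauto
    · -- cs = c0 :: rest, generic
      rename_i c0 rest hno
      have hlen' : rest.length ≤ n := by simp at hlen; omega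
      split
      · next hB =>
        rw [ih rest hlen']
        simp only [List.flatten_cons, List.mem_append, List.mem_reverse, List.mem_cons,
          List.not_mem_nil, false_or]
        constructor
        · rintro (h | h | ⟨h1, h2⟩) <;> tauto
        · rintro (h | h | ⟨(rfl | h1), h2⟩) <;> first
            | tauto
            | (rw [hB] at h2; cases h2)
      · next hB =>
        rw [ih rest hlen']
        simp only [List.mem_cons]
        have hB' : pvIsB c0 = false := by simpa using hB
        constructor
        · rintro (h | (rfl | h) | ⟨h1, h2⟩) <;> tauto
        · rintro (h | h | ⟨(rfl | h1), h2⟩) <;> tauto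

lemma pv_mem_splitlines (cs : List Char) (c : Char) :
    c ∈ (PySem.Chars.splitlines cs).flatten ↔ c ∈ cs ∧ pvIsB c = false := by
  rw [pv_splitlines_eq]
  simpa using pv_go_mem cs.length cs le_rfl [] [] c

lemma pv_replace_go_mem (old new : List Char) :
    ∀ (fuel : Nat) (l acc : List Char) (c : Char),
      c ∈ PySem.Chars.replace.go old new fuel l acc → c ∈ acc ∨ c ∈ l ∨ c ∈ new := by
  intro fuel
  induction fuel with
  | zero =>
    intro l acc c h
    have he : PySem.Chars.replace.go old new 0 l acc = acc.reverse ++ l := by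
      rw [PySem.Chars.replace.go.eq_def]
    rw [he] at h
    simp at h
    tauto
  | succ fuel ih =>
    intro l acc c h
    cases l with
    | nil =>
      have he : PySem.Chars.replace.go old new (fuel+1) [] acc = acc.reverse := by
        rw [PySem.Chars.replace.go.eq_def]
      rw [he] at h
      simp at h
      tauto
    | cons c0 t =>
      rw [PySem.Chars.replace.go.eq_def] at h
      simp only [] at h
      split at h
      · rcases ih _ _ _ h with h1 | h2 | h3
        · simp only [List.mem_append, List.mem_reverse] at h1
          tauto
        · exact Or.inr (Or.inl (List.drop_subset _ _ h2))
        · tauto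
      · rcases ih _ _ _ h with h1 | h2 | h3
        · simp only [List.mem_cons] at h1
          rcases h1 with rfl | h1
          · simp
          · tauto
        · exact Or.inr (Or.inl (List.mem_cons_of_mem _ h2))
        · tauto

lemma pv_replace_go_mem_of (old new : List Char) (c : Char) (hc : c ∉ old) :
    ∀ (fuel : Nat) (l acc : List Char), (c ∈ acc ∨ c ∈ l) →
      c ∈ PySem.Chars.replace.go old new fuel l acc := by
  intro fuel
  induction fuel with
  | zero =>
    intro l acc h
    have he : PySem.Chars.replace.go old new 0 l acc = acc.reverse ++ l := by
      rw [PySem.Chars.replace.go.eq_def]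
    rw [he]
    simp
    tauto
  | succ fuel ih =>
    intro l acc h
    cases l with
    | nil =>
      have he : PySem.Chars.replace.go old new (fuel+1) [] acc = acc.reverse := by
        rw [PySem.Chars.replace.go.eq_def]
      rw [he]
      simp at h ⊢
      tauto
    | cons c0 t =>
      rw [PySem.Chars.replace.go.eq_def]
      simp only []
      split
      · next hpre =>
        apply ih
        rcases h with h | h
        · left; simp [h]
        · right
          obtain ⟨t', ht⟩ := List.isPrefixOf_iff_prefix.mp hpre
          rw [← ht, List.drop_left]
          rw [← ht] at h
          rcases List.mem_append.mp h with h1 | h1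
          · exact absurd h1 hc
          · exact h1
      · apply ih
        rcases h with h | h
        · left; simp [h]
        · rcases List.mem_cons.mp h with rfl | h1
          · left; simp
          · right; exact h1

-- after the tab replacement, no tab is left
lemma pv_replace_go_no_tab :
    ∀ (fuel : Nat) (l acc : List Char), l.length ≤ fuel → ('\t' : Char) ∉ acc →
      ('\t' : Char) ∉ PySem.Chars.replace.go ['\t'] [' ',' ',' ',' '] fuel l acc := by
  intro fuel
  induction fuel with
  | zero =>
    intro l acc hlen hacc
    have hl : l = [] := List.length_eq_zero_iff.mp (Nat.le_zero.mp hlen)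
    subst hl
    have he : PySem.Chars.replace.go ['\t'] [' ',' ',' ',' '] 0 [] acc = acc.reverse ++ [] := by
      rw [PySem.Chars.replace.go.eq_def]
    rw [he]
    simpa using hacc
  | succ fuel ih =>
    intro l acc hlen hacc
    cases l with
    | nil =>
      have he : PySem.Chars.replace.go ['\t'] [' ',' ',' ',' '] (fuel+1) [] acc = acc.reverse := by
        rw [PySem.Chars.replace.go.eq_def]
      rw [he]
      simpa using hacc
    | cons c0 t =>
      rw [PySem.Chars.replace.go.eq_def]
      simp only []
      split
      · next hpre =>
        apply ih
        · have : (List.drop 1 (c0 :: t)).length ≤ fuel := by simp at hlen ⊢; omega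
          simpa using this
        · intro hm
          rcases List.mem_append.mp hm with h1 | h1
          · simp at h1
          · exact hacc h1
      · next hpre =>
        apply ih
        · simp at hlen ⊢; omega
        · intro hm
          rcases List.mem_cons.mp hm with h1 | h1
          · apply hpre
            rw [List.isPrefixOf_iff_prefix, ← h1]
            exact ⟨t, rfl⟩
          · exact hacc h1

lemma pv_rep_space_iff (cs : List Char) :
    (∀ c ∈ PySem.Chars.replace cs ['\t'] [' ',' ',' ',' '], PySem.Chars.isspace c = true) ↔
      (∀ c ∈ cs, PySem.Chars.isspace c = true) := by
  have hrep : PySem.Chars.replace cs ['\t'] [' ',' ',' ',' '] =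
      PySem.Chars.replace.go ['\t'] [' ',' ',' ',' '] cs.length cs [] := by
    rw [PySem.Chars.replace]
    rfl
  rw [hrep]
  constructor
  · intro h c hc
    by_contra hsp
    have hct : c ∉ ['\t'] := by
      intro hm
      simp at hm
      subst hm
      exact hsp (by decide)
    exact hsp (h c (pv_replace_go_mem_of _ _ c hct _ _ _ (Or.inr hc)))
  · intro h c hc
    rcases pv_replace_go_mem _ _ _ _ _ c hc with h1 | h2 | h3
    · simp at h1
    · exact h c h2
    · simp at h3
      rcases h3 with rfl | rfl | rfl | rfl
      all_goals decide

lemma pv_lstrip_nil_iff (l : List Char) :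
    PySem.Chars.lstrip l = [] ↔ ∀ c ∈ l, PySem.Chars.isspace c = true := by
  simp [PySem.Chars.lstrip, List.dropWhile_eq_nil_iff]

lemma pv_strip_nil_iff (l : List Char) :
    PySem.Chars.strip l = [] ↔ PySem.Chars.lstrip l = [] := by
  simp only [PySem.Chars.strip, PySem.Chars.rstrip, List.reverse_eq_nil_iff,
    List.dropWhile_eq_nil_iff, List.mem_reverse]
  constructor
  · intro h
    cases hd : PySem.Chars.lstrip l with
    | nil => rfl
    | cons d ds =>
      exfalso
      have hdrop : List.dropWhile PySem.Chars.isspace l = d :: ds := hd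
      have hds : PySem.Chars.isspace d = false := by
        have := List.head?_dropWhile_not PySem.Chars.isspace l
        rw [hdrop] at this
        simpa using this
      have h2 := h d (by rw [hd]; simp)
      simp [hds] at h2
  · intro h c hc
    rw [h] at hc
    simp at hc

lemma pv_blank_iff (l : List Char) : pvA_blank l = true ↔ PySem.Chars.lstrip l = [] := by
  rw [pvA_blank, beq_iff_eq, pv_strip_nil_iff]

lemma pv_popLeading_eq (ls : List (List Char)) :
    pvA_popLeading ls = ls.dropWhile pvA_blank := by
  induction ls with
  | nil => rfl
  | cons l ls ih => rw [pvA_popLeading, List.dropWhile_cons]; split <;> simp_all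

lemma pv_popTrailing_cons (l : List Char) (ls : List (List Char)) :
    pvA_popTrailing (l :: ls) =
      if (pvA_popTrailing ls).isEmpty && pvA_blank l then [] else l :: pvA_popTrailing ls := rfl

lemma pv_popTrailing_eq (ls : List (List Char)) :
    pvA_popTrailing ls = (ls.reverse.dropWhile pvA_blank).reverse := by
  induction ls with
  | nil => rfl
  | cons l ls ih =>
    rw [pv_popTrailing_cons, ih, List.reverse_cons, List.dropWhile_append]
    by_cases he : (List.dropWhile pvA_blank ls.reverse).isEmpty
    · rw [he]
      simp only [List.isEmpty_reverse, he, Bool.true_and, if_true]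
      by_cases hb : pvA_blank l
      · simp [hb]
      · simp [hb, List.isEmpty_iff.mp he]
    · rw [eq_false_of_ne_true he]
      simp only [List.isEmpty_reverse, he, Bool.false_and]
      simp [List.reverse_append]

lemma pv_trim_nil_iff (ls : List (List Char)) :
    pvA_popTrailing (pvA_popLeading ls) = [] ↔ ∀ l ∈ ls, pvA_blank l = true := by
  rw [pv_popLeading_eq, pv_popTrailing_eq, List.reverse_eq_nil_iff, List.dropWhile_eq_nil_iff]
  simp only [List.mem_reverse]
  constructor
  · intro h l hl
    rcases List.mem_append.mp ((List.takeWhile_append_dropWhile (p := pvA_blank) (l := ls)) ▸ hl) with h1 | h2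
    · exact List.mem_takeWhile_imp h1
    · exact h l h2
  · intro h l hl
    exact h l ((List.dropWhile_sublist _).mem hl)

lemma pv_filterMap_dropWhile {α : Type} (g : List Char → Option α)
    (hg : ∀ l, pvA_blank l = true → g l = none) (ls : List (List Char)) :
    (ls.dropWhile pvA_blank).filterMap g = ls.filterMap g := by
  induction ls with
  | nil => rfl
  | cons l ls ih =>
    rw [List.dropWhile_cons]
    split
    · next h => rw [ih, List.filterMap_cons, hg l h]
    · rfl

lemma pv_filterMap_popTrailing {α : Type} (g : List Char → Option α)
    (hg : ∀ l, pvA_blank l = true → g l = none) (ls : List (List Char)) :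
    (pvA_popTrailing ls).filterMap g = ls.filterMap g := by
  induction ls with
  | nil => rfl
  | cons l ls ih =>
    rw [pv_popTrailing_cons]
    split
    · next h =>
      obtain ⟨he, hb⟩ := Bool.and_eq_true_iff.mp h
      rw [List.filterMap_cons, hg l hb, ← ih, List.isEmpty_iff.mp he]
    · rw [List.filterMap_cons, List.filterMap_cons, ih]

lemma pv_foldl_min_eq (ys : List Int) :
    ys.foldl pvOM none = PySem.List.min? ys (fun x => x) := by
  rw [PySem.List.min?]
  congr 1
  funext m v
  cases m with
  | none => rfl
  | some w =>
    simp only [pvOM]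
    split
    · next h => rw [min_eq_right (le_of_lt h)]
    · next h => rw [min_eq_left (by simp at h; omega)]

lemma pv_guard_iff (code : String) :
    (PySem.Str.strip code == "") = true ↔
      ∀ l ∈ PySem.Chars.splitlines (PySem.Chars.replace code.toList ['\t'] [' ',' ',' ',' ']),
        pvA_blank l = true := by
  have h1 : (PySem.Str.strip code == "") = true ↔ PySem.Chars.strip code.toList = [] := by
    rw [beq_iff_eq, ← String.toList_eq_nil_iff, PySem.Str.toList_strip]
  rw [h1, pv_strip_nil_iff, pv_lstrip_nil_iff, ← pv_rep_space_iff]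
  constructor
  · intro h l hl
    rw [pv_blank_iff, pv_lstrip_nil_iff]
    intro c hc
    exact h c ((pv_mem_splitlines _ c).mp (List.mem_flatten.mpr ⟨l, hl, hc⟩)).1
  · intro h c hc
    by_cases hb : pvIsB c = true
    · exact pv_isB_isspace c hb
    · have hcf : c ∈ (PySem.Chars.splitlines (PySem.Chars.replace code.toList ['\t'] [' ',' ',' ',' '])).flatten :=
        (pv_mem_splitlines _ c).mpr ⟨hc, by simpa using hb⟩
      obtain ⟨l, hl, hcl⟩ := List.mem_flatten.mp hcf
      have hbl := (pv_blank_iff l).mp (h l hl)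
      rw [pv_lstrip_nil_iff] at hbl
      exact hbl c hcl

lemma pv_dropWhile_join (ys : List (List Char)) (hy : ∀ y ∈ ys, y = [] ∨ ('\n' : Char) ∉ y) :
    List.dropWhile (fun d => d == '\n') (PySem.Chars.join ['\n'] ys) =
      PySem.Chars.join ['\n'] (ys.dropWhile List.isEmpty) := by
  induction ys with
  | nil => simp [PySem.Chars.join_nil]
  | cons y rest ih =>
    cases rest with
    | nil =>
      rw [PySem.Chars.join_singleton]
      cases y with
      | nil => simp [PySem.Chars.join_nil]
      | cons d y' =>
        have hd : d ≠ '\n' := by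
          rcases hy (d :: y') (by simp) with h | h
          · simp at h
          · intro hdn; exact h (hdn ▸ List.mem_cons_self)
        rw [List.dropWhile_cons]
        simp only [beq_iff_eq, hd, if_false]
        simp [PySem.Chars.join_singleton]
    | cons y2 t =>
      rw [PySem.Chars.join_cons_cons]
      have ih' := ih (fun y hyy => hy y (List.mem_cons_of_mem _ hyy))
      cases y with
      | nil =>
        simp only [List.nil_append, List.singleton_append, List.dropWhile_cons]
        simp only [beq_self_eq_true, if_true]
        rw [ih']
        congr 1
        simp [List.dropWhile_cons]
      | cons d y' =>
        have hd : d ≠ '\n' := by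
          rcases hy (d :: y') (by simp) with h | h
          · simp at h
          · intro hdn; exact h (hdn ▸ List.mem_cons_self)
        have hstop : List.dropWhile (fun d => d == '\n') ((d :: y') ++ ['\n'] ++ PySem.Chars.join ['\n'] (y2 :: t)) =
            (d :: y') ++ ['\n'] ++ PySem.Chars.join ['\n'] (y2 :: t) := by
          rw [List.cons_append, List.cons_append, List.dropWhile_cons]
          simp [hd]
        rw [hstop]
        have hall : List.dropWhile List.isEmpty ((d :: y') :: y2 :: t) = (d :: y') :: y2 :: t := by
          simp
        rw [hall, PySem.Chars.join_cons_cons]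

lemma pv_join_snoc (zs : List (List Char)) (w : List Char) (h : zs ≠ []) :
    PySem.Chars.join ['\n'] (zs ++ [w]) = PySem.Chars.join ['\n'] zs ++ '\n' :: w := by
  induction zs with
  | nil => exact absurd rfl h
  | cons z zs ih =>
    cases zs with
    | nil =>
      rw [List.cons_append, List.nil_append, PySem.Chars.join_cons_cons,
        PySem.Chars.join_singleton, PySem.Chars.join_singleton]
      simp
    | cons z2 t =>
      have hx : (z :: z2 :: t) ++ [w] = z :: ((z2 :: t) ++ [w]) := by simp
      rw [hx, show (z2 :: t) ++ [w] = z2 :: (t ++ [w]) from rfl, PySem.Chars.join_cons_cons,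
        show z2 :: (t ++ [w]) = (z2 :: t) ++ [w] from rfl, ih (by simp),
        PySem.Chars.join_cons_cons]
      simp

lemma pv_join_reverse (ys : List (List Char)) :
    (PySem.Chars.join ['\n'] ys).reverse = PySem.Chars.join ['\n'] ((ys.map List.reverse).reverse) := by
  induction ys with
  | nil => simp [PySem.Chars.join_nil]
  | cons y rest ih =>
    cases rest with
    | nil => simp [PySem.Chars.join_singleton]
    | cons y2 t =>
      rw [PySem.Chars.join_cons_cons]
      have hne : ((y2 :: t).map List.reverse).reverse ≠ [] := by simp
      rw [List.map_cons, List.reverse_cons, pv_join_snoc _ _ hne]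
      rw [← ih]
      simp

lemma pv_stripChars_join (ys : List (List Char)) (hy : ∀ y ∈ ys, y = [] ∨ ('\n' : Char) ∉ y) :
    PySem.Chars.stripChars (PySem.Chars.join ['\n'] ys) ['\n'] =
      PySem.Chars.join ['\n'] (((ys.dropWhile List.isEmpty).reverse.dropWhile List.isEmpty).reverse) := by
  have hP : (fun c => List.contains ['\n'] c) = (fun c : Char => c == '\n') := by
    funext c
    simp [BEq.beq]
  rw [PySem.Chars.stripChars, hP]
  set zs := ys.dropWhile List.isEmpty with hzs
  rw [pv_dropWhile_join ys hy, pv_join_reverse]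
  have hzy : ∀ y ∈ (zs.reverse.map List.reverse), y = [] ∨ ('\n' : Char) ∉ y := by
    intro y hyy
    obtain ⟨y', hy', rfl⟩ := List.mem_map.mp hyy
    have hym : y' ∈ ys := (List.dropWhile_sublist _).mem (List.mem_reverse.mp hy')
    rcases hy y' hym with rfl | h
    · left; rfl
    · right; simpa using h
  have hmapcomm : (zs.map List.reverse).reverse = zs.reverse.map List.reverse := by
    rw [List.map_reverse]
  rw [hmapcomm, pv_dropWhile_join _ hzy]
  have hdwcomm : List.dropWhile List.isEmpty (zs.reverse.map List.reverse) =
      (zs.reverse.dropWhile List.isEmpty).map List.reverse := by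
    rw [List.dropWhile_map]
    have hc : ((List.isEmpty ∘ List.reverse) : List Char → Bool) = (List.isEmpty : List Char → Bool) := by
      funext y
      simp [Function.comp]
    rw [hc]
  rw [hdwcomm, pv_join_reverse]
  congr 1
  rw [List.map_map]
  simp

-- ---- new B-side lemmas ----

lemma pv_isspace_good (c : Char) (h : pvGood c = true) :
    PySem.Chars.isspace c = (c == ' ') := by
  have hn : 32 ≤ c.toNat ∧ c.toNat ≤ 126 := by
    simpa [pvGood] using h
  by_cases he : c = ' '
  · subst he; rfl
  · have h32 : c.toNat ≠ 32 := fun hx => he (Char.ext (UInt32.toNat_inj.mp hx))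
    have h1 : PySem.Chars.isspace c = false := by
      simp only [PySem.Chars.isspace, Bool.or_eq_false_iff, Bool.and_eq_false_iff,
        decide_eq_false_iff_not]
      omega
    have h2 : (c == ' ') = false := by
      simpa using he
    rw [h1, h2]

-- every character of every line is printable ASCII on Dom
lemma pv_lines_good (code : String) (hdom : Dom_normalize_indentation_simple code 0) :
    ∀ l ∈ PySem.Chars.splitlines (PySem.Chars.replace code.toList ['\t'] [' ',' ',' ',' ']),
      ∀ c ∈ l, pvGood c = true := by
  intro l hl c hc
  have hflat : c ∈ (PySem.Chars.splitlines (PySem.Chars.replace code.toList ['\t'] [' ',' ',' ',' '])).flatten :=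
    List.mem_flatten.mpr ⟨l, hl, hc⟩
  obtain ⟨hcs, hnb⟩ := (pv_mem_splitlines _ c).mp hflat
  have hnotab : c ≠ '\t' := by
    intro he
    subst he
    have hrep : PySem.Chars.replace code.toList ['\t'] [' ',' ',' ',' '] =
        PySem.Chars.replace.go ['\t'] [' ',' ',' ',' '] code.toList.length code.toList [] := by
      rw [PySem.Chars.replace]
      rfl
    rw [hrep] at hcs
    exact pv_replace_go_no_tab code.toList.length code.toList [] le_rfl (by simp) hcs
  have hdomc : pvDomChar c = true ∨ c = ' ' := by
    rcases pv_replace_go_mem _ _ _ _ _ c hcs with h1 | h2 | h3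
    · simp at h1
    · left
      have hall : ∀ x ∈ code.toList, pvDomChar x = true := by
        have := hdom
        simp only [Dom_normalize_indentation_simple, Bool.and_eq_true, pvDomStr, List.all_eq_true] at this
        exact fun x hx => this.1 x hx
      exact hall c h2
    · right
      simp at h3
      rcases h3 with rfl | rfl | rfl | rfl <;> rfl
  rcases hdomc with h | rfl
  · simp only [pvDomChar, Bool.or_eq_true, Bool.and_eq_true, decide_eq_true_eq, beq_iff_eq] at h
    simp only [pvIsB, Bool.or_eq_false_iff, decide_eq_false_iff_not] at hnb
    have h9 : c.toNat ≠ 9 := fun hx => hnotab (Char.ext (UInt32.toNat_inj.mp hx))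
    simp only [pvGood, Bool.and_eq_true, decide_eq_true_eq]
    omega
  · decide

-- the whitespace prefix of a printable-ASCII line is a run of spaces
lemma pv_takeWhile_spaces (l : List Char) (hg : ∀ c ∈ l, pvGood c = true) :
    l.takeWhile PySem.Chars.isspace = List.replicate (l.length - (PySem.Chars.lstrip l).length) ' ' := by
  have hmem : ∀ c ∈ l.takeWhile PySem.Chars.isspace, c = ' ' := by
    intro c hc
    have h1 := List.mem_takeWhile_imp hc
    have h2 := hg c ((List.takeWhile_sublist (p := PySem.Chars.isspace)).mem hc)
    rw [pv_isspace_good c h2] at h1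
    exact eq_of_beq h1
  have hlen : (l.takeWhile PySem.Chars.isspace).length = l.length - (PySem.Chars.lstrip l).length := by
    have := congrArg List.length (List.takeWhile_append_dropWhile (p := PySem.Chars.isspace) (l := l))
    simp only [List.length_append] at this
    simp only [PySem.Chars.lstrip]
    omega
  rw [← hlen]
  exact List.eq_replicate_of_mem hmem

lemma pv_decomp (l : List Char) (hg : ∀ c ∈ l, pvGood c = true) :
    l = List.replicate (l.length - (PySem.Chars.lstrip l).length) ' ' ++ PySem.Chars.lstrip l := by
  conv_lhs => rw [← List.takeWhile_append_dropWhile (p := PySem.Chars.isspace) (l := l)]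
  rw [pv_takeWhile_spaces l hg]
  rfl

lemma pv_indent_facts (l : List Char) :
    0 ≤ pvA_indent l ∧ (pvA_indent l).toNat = l.length - (PySem.Chars.lstrip l).length := by
  have hle : (PySem.Chars.lstrip l).length ≤ l.length := by
    simpa [PySem.Chars.lstrip] using (List.dropWhile_sublist (p := PySem.Chars.isspace) (l := l)).length_le
  unfold pvA_indent
  omega

-- B's 'line[:len(line)-len(stripped)]' is the space run
lemma pv_slice_indent (l : List Char) (hg : ∀ c ∈ l, pvGood c = true) :
    PySem.Chars.slice l none (some ((l.length : Int) - (((PySem.Chars.lstrip l).length : Nat) : Int))) =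
      List.replicate (l.length - (PySem.Chars.lstrip l).length) ' ' := by
  have hle : (PySem.Chars.lstrip l).length ≤ l.length := by
    simpa [PySem.Chars.lstrip] using (List.dropWhile_sublist (p := PySem.Chars.isspace) (l := l)).length_le
  have hcast : (l.length : Int) - (((PySem.Chars.lstrip l).length : Nat) : Int) =
      ((l.length - (PySem.Chars.lstrip l).length : Nat) : Int) := by
    omega
  rw [PySem.Chars.slice_eq_listSlice, hcast, PySem.List.slice_to_natCast]
  have hpre := List.takeWhile_prefix (p := PySem.Chars.isspace) (l := l)
  have htw := pv_takeWhile_spaces l hg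
  have hlen2 : (l.takeWhile PySem.Chars.isspace).length = l.length - (PySem.Chars.lstrip l).length := by
    rw [htw]; simp
  rw [List.prefix_iff_eq_take] at hpre
  rw [← hlen2, ← hpre, htw]
  simp

lemma pv_shrink_rep : ∀ a b : Nat, pvShrink (List.replicate a ' ') (List.replicate b ' ') = List.replicate (min a b) ' ' := by
  intro a
  induction a using Nat.strong_induction_on with
  | _ a ih =>
    intro b
    rw [pvShrink]
    by_cases h : a ≤ b
    · rw [if_pos, min_eq_left h]
      simp only [PySem.Chars.startswith]
      rw [List.isPrefixOf_iff_prefix]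
      refine ⟨List.replicate (b - a) ' ', ?_⟩
      rw [← List.replicate_add]
      congr 1
      omega
    · have ha : a ≠ 0 := by omega
      rw [if_neg, PySem.Chars.slice_eq_listSlice, PySem.List.slice_to_neg_one,
        List.dropLast_replicate, ih (a - 1) (by omega) b]
      · congr 1
        omega
      · simp only [PySem.Chars.startswith]
        rw [List.isPrefixOf_iff_prefix]
        intro hp
        have := hp.length_le
        simp at this
        omega

-- the margin loop tracks A's running integer minimum, as a replicate string
lemma pv_fold_margin (ls : List (List Char)) (hg : ∀ l ∈ ls, ∀ c ∈ l, pvGood c = true) :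
    ∀ st : Option Int, (∀ v, st = some v → 0 ≤ v) →
      ls.foldl pvB_marginStep (st.map pvRep) = ((ls.filterMap pvH).foldl pvOM st).map pvRep := by
  induction ls with
  | nil => intro st _; rfl
  | cons l ls ih =>
    intro st hst
    have hgl : ∀ c ∈ l, pvGood c = true := hg l List.mem_cons_self
    have hg' : ∀ l' ∈ ls, ∀ c ∈ l', pvGood c = true := fun l' h => hg l' (List.mem_cons_of_mem _ h)
    rw [List.foldl_cons, List.filterMap_cons]
    by_cases hb : PySem.Chars.lstrip l = []
    · have hstep : pvB_marginStep (st.map pvRep) l = st.map pvRep := by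
        simp [pvB_marginStep, hb]
      have hH : pvH l = none := by simp [pvH, hb]
      rw [hstep, hH]
      exact ih hg' st hst
    · have hH : pvH l = some (pvA_indent l) := by simp [pvH, hb]
      rw [hH, List.foldl_cons]
      obtain ⟨hind0, hindt⟩ := pv_indent_facts l
      have hstep : pvB_marginStep (st.map pvRep) l = (pvOM st (pvA_indent l)).map pvRep := by
        cases st with
        | none =>
          rw [pvOM_none]
          simp only [pvB_marginStep, Option.map_none, if_pos hb, Option.map_some]
          rw [pv_slice_indent l hgl]
          simp only [pvRep, hindt]
        | some v =>
          have hv : 0 ≤ v := hst v rfl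
          rw [pvOM_some]
          simp only [pvB_marginStep, Option.map_some, if_pos hb]
          rw [pv_slice_indent l hgl]
          simp only [pvRep]
          rw [pv_shrink_rep]
          have hmin : (min v (pvA_indent l)).toNat = min v.toNat (pvA_indent l).toNat := by
            rcases le_total v (pvA_indent l) with h | h
            · rw [min_eq_left h, min_eq_left (by omega)]
            · rw [min_eq_right h, min_eq_right (by omega)]
          rw [hmin, hindt]
      rw [hstep]
      apply ih hg'
      intro v hv
      cases st with
      | none =>
        rw [pvOM_none] at hv
        injection hv with h'
        omega
      | some w =>
        have hw : 0 ≤ w := hst w rfl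
        rw [pvOM_some] at hv
        injection hv with h'
        omega

theorem pv_main (code : String) (t : Int) (hdom : Dom_normalize_indentation_simple code t)
    (ht : 0 ≤ t) :
    normalize_indentation_simple code t = normalize_indentation_simple_alt code t := by
  rw [normalize_indentation_simple, normalize_indentation_simple_alt]
  simp only []
  set cs : List Char := PySem.Chars.replace code.toList ['\t'] [' ',' ',' ',' '] with hcs
  set lines : List (List Char) := PySem.Chars.splitlines cs with hlines
  have hdom0 : Dom_normalize_indentation_simple code 0 := by
    simp only [Dom_normalize_indentation_simple, Bool.and_eq_true] at hdom ⊢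
    exact ⟨hdom.1, by decide⟩
  have hgood : ∀ l ∈ lines, ∀ c ∈ l, pvGood c = true := pv_lines_good code hdom0
  have hHnone : ∀ l, pvA_blank l = true → pvH l = none := by
    intro l hl
    simp [pvH, (pv_blank_iff l).mp hl]
  have hmargin : lines.foldl pvB_marginStep none =
      (PySem.List.min? (lines.filterMap pvH) (fun x => x)).map pvRep := by
    have := pv_fold_margin lines hgood none (by intro v hv; cases hv)
    simpa [pv_foldl_min_eq] using this
  by_cases hg : (PySem.Str.strip code == "") = true
  · rw [if_pos hg]
    have hall : ∀ l ∈ lines, pvA_blank l = true := (pv_guard_iff code).mp hg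
    have hnil : lines.filterMap pvH = [] := by
      rw [List.filterMap_eq_nil_iff]
      intro l hl
      exact hHnone l (hall l hl)
    rw [hmargin, hnil]
    rfl
  · rw [if_neg hg]
    have hnotall : ¬ ∀ l ∈ lines, pvA_blank l = true := fun h => hg ((pv_guard_iff code).mpr h)
    have htrimne : pvA_popTrailing (pvA_popLeading lines) ≠ [] :=
      fun h => hnotall ((pv_trim_nil_iff lines).mp h)
    rw [if_neg (by simpa [List.isEmpty_iff] using htrimne)]
    have hne : lines.filterMap pvH ≠ [] := by
      intro h
      apply hnotall
      intro l hl
      have hx := List.filterMap_eq_nil_iff.mp h l hl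
      rw [pvH] at hx
      by_cases hc : PySem.Chars.lstrip l ≠ []
      · rw [if_pos hc] at hx; cases hx
      · apply (pv_blank_iff l).mpr
        simpa using hc
    obtain ⟨m, hm⟩ : ∃ m, PySem.List.min? (lines.filterMap pvH) (fun x => x) = some m := by
      cases h' : PySem.List.min? (lines.filterMap pvH) (fun x => x) with
      | none => exact absurd ((PySem.List.min?_eq_none_iff _ _).mp h') hne
      | some m => exact ⟨m, rfl⟩
    have hm0 : 0 ≤ m := by
      have hmem := PySem.List.min?_mem hm
      obtain ⟨l, _, hl2⟩ := List.mem_filterMap.mp hmem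
      rw [pvH] at hl2
      split at hl2
      · injection hl2 with h'
        rw [← h']
        exact (pv_indent_facts l).1
      · cases hl2
    rw [hmargin, hm]
    simp only [Option.map_some]
    -- A's min fold over the trimmed lines equals the same min
    have hfold : (pvA_popTrailing (pvA_popLeading lines)).foldl (fun m l =>
        if !(pvA_blank l) then
          some (match m with
                | none => pvA_indent l
                | some v => min v (pvA_indent l))
        else m) (none : Option Int) = some m := by
      have hbody : (fun (m : Option Int) (l : List Char) =>
          if !(pvA_blank l) then
            some (match m with
                  | none => pvA_indent l
                  | some v => min v (pvA_indent l))
          else m) = (fun (m : Option Int) (l : List Char) =>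
            (pvH l).elim m (fun v => pvOM m v)) := by
        funext mo l
        rw [pvH]
        by_cases hb : pvA_blank l = true
        · simp [hb, (pv_blank_iff l).mp hb]
        · have hbf : pvA_blank l = false := Bool.eq_false_iff.mpr hb
          have hlne : PySem.Chars.lstrip l ≠ [] := fun hx => hb ((pv_blank_iff l).mpr hx)
          simp only [hbf, Bool.not_false, if_pos, ne_eq, hlne, not_false_eq_true, if_true,
            Option.elim_some]
          rfl
      rw [hbody]
      have hstep' : ((pvA_popTrailing (pvA_popLeading lines)).filterMap pvH).foldl pvOM none =
          (pvA_popTrailing (pvA_popLeading lines)).foldl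
            (fun (mo : Option Int) (l : List Char) => (pvH l).elim mo (fun v => pvOM mo v)) none := by
        rw [List.foldl_filterMap]
        congr 1
        funext x y
        cases pvH y <;> rfl
      rw [← hstep', pv_filterMap_popTrailing pvH hHnone, pv_popLeading_eq,
        pv_filterMap_dropWhile pvH hHnone, pv_foldl_min_eq, hm]
    rw [hfold]
    simp only [Option.getD_some]
    -- A's render as a map over the trimmed lines
    have hbody2 : (fun (acc : List (List Char)) (l : List Char) =>
        if !(pvA_blank l) then
          acc ++ [PySem.List.pyRepeat [' '] (t + (pvA_indent l - m)) ++ PySem.Chars.lstrip l]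
        else acc ++ [([] : List Char)]) =
        (fun acc l => acc ++ [if !(pvA_blank l) then
          PySem.List.pyRepeat [' '] (t + (pvA_indent l - m)) ++ PySem.Chars.lstrip l else []]) := by
      funext acc l
      by_cases hb : pvA_blank l = true
      · simp [hb]
      · simp [Bool.eq_false_iff.mpr hb]
    rw [hbody2, PySem.List.foldl_append_singleton_eq_map, List.nil_append]
    set fA : List Char → List Char := fun l =>
      if !(pvA_blank l) then
        PySem.List.pyRepeat [' '] (t + (pvA_indent l - m)) ++ PySem.Chars.lstrip l else [] with hfA
    -- B's per-line render agrees with A's on every actual line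
    have hmapeq : lines.map (fun l =>
        if PySem.Chars.strip l ≠ [] then
          PySem.List.pyRepeat [' '] t ++ PySem.Chars.slice l (some (((pvRep m).length : Nat) : Int)) none
        else []) = lines.map fA := by
      apply List.map_congr_left
      intro l hl
      by_cases hb : pvA_blank l = true
      · have hsl : ¬ PySem.Chars.strip l ≠ [] := by
          simp only [ne_eq, not_not]
          exact beq_iff_eq.mp hb
        rw [if_neg hsl, hfA]
        simp [hb]
      · have hbf : pvA_blank l = false := Bool.eq_false_iff.mpr hb
        have hlne : PySem.Chars.lstrip l ≠ [] := fun hx => hb ((pv_blank_iff l).mpr hx)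
        have hsl : PySem.Chars.strip l ≠ [] := fun hx => hb ((pv_blank_iff l).mpr ((pv_strip_nil_iff l).mp hx))
        rw [if_pos hsl, hfA]
        simp only [hbf, Bool.not_false, if_pos]
        -- m ≤ indent of this line
        have hmle : m ≤ pvA_indent l := by
          apply PySem.List.min?_id_le hm
          apply List.mem_filterMap.mpr
          exact ⟨l, hl, by simp [pvH, hlne]⟩
        obtain ⟨hind0, hindt⟩ := pv_indent_facts l
        have hgl := hgood l hl
        -- unfold the slice into a drop
        have hlen : ((pvRep m).length : Int) = ((m.toNat : Nat) : Int) := by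
          simp [pvRep]
        rw [PySem.Chars.slice_eq_listSlice, hlen, PySem.List.slice_from_natCast]
        -- decompose the line into its space run and its stripped tail
        have hdrop : List.drop m.toNat l =
            List.replicate ((l.length - (PySem.Chars.lstrip l).length) - m.toNat) ' ' ++ PySem.Chars.lstrip l := by
          conv_lhs => rw [pv_decomp l hgl]
          rw [List.drop_append_of_le_length (by simp; omega), List.drop_replicate]
        rw [hdrop, PySem.List.pyRepeat_singleton, PySem.List.pyRepeat_singleton]
        rw [show (t + (pvA_indent l - m)).toNat = t.toNat + (l.length - (PySem.Chars.lstrip l).length - m.toNat) by omega]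
        rw [List.replicate_add, List.append_assoc]
    rw [hmapeq]
    -- now strip the boundary blank lines off the joined text
    have hnolines : ∀ l ∈ lines, ('\n' : Char) ∉ l := by
      intro l hl hmem
      have hx := (pv_mem_splitlines cs '\n').mp (List.mem_flatten.mpr ⟨l, hl, hmem⟩)
      rw [show pvIsB '\n' = true from by decide] at hx
      cases hx.2
    have hy : ∀ y ∈ lines.map fA, y = [] ∨ ('\n' : Char) ∉ y := by
      intro y hyy
      obtain ⟨l, hl, rfl⟩ := List.mem_map.mp hyy
      rw [hfA]
      by_cases hb : pvA_blank l = true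
      · left; simp [hb]
      · right
        simp only [Bool.eq_false_iff.mpr hb, Bool.not_false, if_pos]
        intro hmem
        rcases List.mem_append.mp hmem with h1 | h1
        · rw [PySem.List.pyRepeat_singleton] at h1
          have := List.eq_of_mem_replicate h1
          simp at this
        · exact hnolines l hl ((List.dropWhile_sublist _).mem (by simpa [PySem.Chars.lstrip] using h1))
    rw [pv_stripChars_join (lines.map fA) hy]
    congr 1
    have hcompeq : ((List.isEmpty ∘ fA) : List Char → Bool) = pvA_blank := by
      funext l
      simp only [Function.comp, hfA]
      by_cases hb : pvA_blank l = true
      · simp [hb]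
      · have hlne : PySem.Chars.lstrip l ≠ [] := fun hx => hb ((pv_blank_iff l).mpr hx)
        simp only [Bool.eq_false_iff.mpr hb, Bool.not_false, if_pos]
        simp [hlne]
    have h1 : (lines.map fA).dropWhile List.isEmpty = (lines.dropWhile pvA_blank).map fA := by
      rw [List.dropWhile_map, hcompeq]
    rw [h1, ← List.map_reverse, List.dropWhile_map, hcompeq, ← List.map_reverse,
      pv_popTrailing_eq, pv_popLeading_eq]

-- ===== VERDICT (by name: the statement is the Claim_ definition above) =====
theorem normalize_indentation_simple_spec : Claim_equal_normalize_indentation_simple := by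
  intro code t hdom ht
  exact (pv_main code t hdom ht).symm ▸ rfl
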